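-- pv_equiv track=rewrite | github.com/Hbos123/Chess-GPT | backend/tools/game_select.py | _normalize_time_category
-- ===== SOURCE A (Python) =====
-- from typing import Any, Dict, List, Optional, Tuple
--
-- def _as_lower_str(x: Any) -> str:
--     try:
--         return str(x or "").strip().lower()
--     except Exception:
--         return ""
--
-- def _normalize_time_category(x: Any) -> str:
--     """
--     Normalize user/tool filter values into our canonical time categories:
--     bullet | blitz | rapid | classical | daily
--     """
--     s = _as_lower_str(x)
--     if not s:
--         return ""
--     # common variants
--     if "correspond" in s or "daily" in s:
--         return "daily"
--     if "bullet" in s: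
--         return "bullet"
--     if "blitz" in s:
--         return "blitz"
--     if "rapid" in s:
--         return "rapid"
--     if "classical" in s or "standard" in s:
--         return "classical"
--     # Sometimes the filter might be like "rapid_game" / "bullet_game"
--     if s.endswith("_game"):
--         return _normalize_time_category(s[:-5])
--     return s
-- ===== SOURCE B (Python) =====
-- from typing import Any
--
-- def _as_lower_str(x: Any) -> str:
--     try:
--         return str(x or "").strip().lower()
--     except Exception:
--         return ""
--
-- _CATEGORY_TABLE = [
--     (("correspond", "daily"), "daily"),
--     (("bullet",), "bullet"),
--     (("blitz",), "blitz"),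
--     (("rapid",), "rapid"),
--     (("classical", "standard"), "classical"),
-- ]
--
-- def _normalize_time_category(x: Any) -> str:
--     s = _as_lower_str(x)
--     if not s:
--         return ""
--     for aliases, cat in _CATEGORY_TABLE:
--         if any(a in s for a in aliases):
--             return cat
--     # iterative version of A's "_game" tail recursion
--     while s.endswith("_game"):
--         s = s[:-5].strip()
--     return s
-- ===== Notes on version B (the rewrite author's own statement) =====
-- stated objective: idiomatic
-- what changed: Replaces A's hard-coded if-elif chain of substring tests with a first-match scan over a data-driven alias table, and replaces A's tail recursion for stripping the game suffix with an iterative while loop.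
import Mathlib
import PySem

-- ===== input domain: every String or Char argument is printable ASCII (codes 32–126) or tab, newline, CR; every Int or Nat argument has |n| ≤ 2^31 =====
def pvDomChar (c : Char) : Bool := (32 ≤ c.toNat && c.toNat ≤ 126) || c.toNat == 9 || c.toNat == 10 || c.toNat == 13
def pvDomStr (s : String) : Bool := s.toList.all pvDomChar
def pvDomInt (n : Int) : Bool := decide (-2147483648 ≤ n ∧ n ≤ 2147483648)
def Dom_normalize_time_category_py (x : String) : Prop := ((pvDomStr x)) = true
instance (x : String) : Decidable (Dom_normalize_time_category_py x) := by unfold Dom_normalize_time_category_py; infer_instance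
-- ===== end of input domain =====

-- B replaces A's if-chain by a first-match scan over an alias table and A's game-suffix tail recursion
-- by an iterative strip loop (objective: idiomatic / data-driven; same cost).
-- Equivalence is about the RETURN value; neither program mutates its argument.

-- ===== PORT A =====
-- _as_lower_str on a str argument: str(x or "") is x itself (the only falsy str is ""), then .strip().lower()
def pvAsLower (s : List Char) : List Char := PySem.Chars.lower (PySem.Chars.strip s)

-- termination helpers (cited by name in the ports' decreasing_by)
theorem pvStripLenLe (s : List Char) : (PySem.Chars.strip s).length ≤ s.length := by
  unfold PySem.Chars.strip PySem.Chars.rstrip PySem.Chars.lstrip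
  have h1 := List.length_dropWhile_le PySem.Chars.isspace s
  have h2 := List.length_dropWhile_le PySem.Chars.isspace (List.dropWhile PySem.Chars.isspace s).reverse
  simp at h2 ⊢
  omega

theorem pvAsLowerLenLe (s : List Char) : (pvAsLower s).length ≤ s.length := by
  unfold pvAsLower PySem.Chars.lower
  simpa using pvStripLenLe s

theorem pvSliceGameLen (s : List Char) (h : PySem.Chars.endswith s "_game".toList = true) :
    (PySem.Chars.slice s none (some (-5))).length = s.length - 5 ∧ 5 ≤ s.length := by
  have hsuf : "_game".toList <:+ s := (PySem.Chars.endswith_iff s "_game".toList).mp h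
  have hlen : 5 ≤ s.length := by simpa using hsuf.length_le
  rw [PySem.Chars.slice_eq_listSlice, PySem.List.slice_to_neg_ofNat s 5 (by omega)]
  simp [hlen]

theorem pvRecLen (x : List Char) (h : PySem.Chars.endswith (pvAsLower x) "_game".toList = true) :
    (PySem.Chars.slice (pvAsLower x) none (some (-5))).length < x.length := by
  obtain ⟨h1, h2⟩ := pvSliceGameLen (pvAsLower x) h
  have := pvAsLowerLenLe x
  omega

def pvNormA (x : List Char) : List Char :=
  let s := pvAsLower x
  if s.isEmpty then []
  else if PySem.Chars.isIn "correspond".toList s || PySem.Chars.isIn "daily".toList s then "daily".toList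
  else if PySem.Chars.isIn "bullet".toList s then "bullet".toList
  else if PySem.Chars.isIn "blitz".toList s then "blitz".toList
  else if PySem.Chars.isIn "rapid".toList s then "rapid".toList
  else if PySem.Chars.isIn "classical".toList s || PySem.Chars.isIn "standard".toList s then "classical".toList
  else if h : PySem.Chars.endswith s "_game".toList = true then pvNormA (PySem.Chars.slice s none (some (-5)))
  else s
termination_by x.length
decreasing_by exact pvRecLen x h

def normalize_time_category_py (x : String) : String := String.ofList (pvNormA x.toList)

-- ===== PORT B =====
def pvTable : List (List (List Char) × List Char) :=
  [ (["correspond".toList, "daily".toList], "daily".toList),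
    (["bullet".toList], "bullet".toList),
    (["blitz".toList], "blitz".toList),
    (["rapid".toList], "rapid".toList),
    (["classical".toList, "standard".toList], "classical".toList) ]

-- the table scan loop of Source B, returning at the first matching row
def pvScan : List (List (List Char) × List Char) → List Char → Option (List Char)
  | [], _ => none
  | (aliases, cat) :: rest, s =>
      if aliases.any (fun a => PySem.Chars.isIn a s) then some cat else pvScan rest s

-- the game-suffix-stripping while loop of Source B
def pvStripGame (s : List Char) : List Char :=
  if h : PySem.Chars.endswith s "_game".toList = true then
    pvStripGame (PySem.Chars.strip (PySem.Chars.slice s none (some (-5))))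
  else s
termination_by s.length
decreasing_by
  obtain ⟨h1, h2⟩ := pvSliceGameLen s h
  have := pvStripLenLe (PySem.Chars.slice s none (some (-5)))
  omega

def pvNormB (x : List Char) : List Char :=
  let s := pvAsLower x
  if s.isEmpty then []
  else
    match pvScan pvTable s with
    | some cat => cat
    | none => pvStripGame s

def normalize_time_category_py_alt (x : String) : String := String.ofList (pvNormB x.toList)

-- ===== PRECONDITION & SPEC =====
def Spec_normalize_time_category_py (x : String) (out : String) : Prop := out = normalize_time_category_py_alt x
instance (x : String) (out : String) : Decidable (Spec_normalize_time_category_py x out) := by unfold Spec_normalize_time_category_py; infer_instance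

-- ===== CLAIM (what is proved, stated in full; the proofs are below) =====
def Claim_equal_normalize_time_category_py : Prop := ∀ (x : String), Dom_normalize_time_category_py x → Spec_normalize_time_category_py x (normalize_time_category_py x)

-- ===== LEMMAS AND PROOFS =====
theorem pvLowerCharIdem (c : Char) : PySem.Chars.lowerChar (PySem.Chars.lowerChar c) = PySem.Chars.lowerChar c := by
  unfold PySem.Chars.lowerChar PySem.Chars.isupper
  split_ifs with h1 h2
  · exfalso
    simp only [Bool.and_eq_true, decide_eq_true_eq] at h1 h2
    obtain ⟨ha, hb⟩ := h1
    rw [Char.le_def] at ha hb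
    have h90 : c.toNat ≤ ((90:UInt32)).toNat := by simpa [UInt32.le_iff_toNat_le] using hb
    have h65 : ((65:UInt32)).toNat ≤ c.toNat := by simpa [UInt32.le_iff_toNat_le] using ha
    simp only [UInt32.toNat_ofNat] at h90 h65
    have hv : Nat.isValidChar (c.toNat + 32) := by left; omega
    have ht : (Char.ofNat (c.toNat + 32)).toNat = c.toNat + 32 := by
      rw [Char.toNat_ofNat, if_pos hv]
    obtain ⟨_, hb2⟩ := h2
    rw [Char.le_def] at hb2
    have h90b : (Char.ofNat (c.toNat + 32)).toNat ≤ ((90:UInt32)).toNat := by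
      simpa [UInt32.le_iff_toNat_le] using hb2
    simp only [UInt32.toNat_ofNat] at h90b
    omega
  · rfl
  · rfl

theorem pvMemLowerFixed {c : Char} {s : List Char} (h : c ∈ PySem.Chars.lower s) :
    PySem.Chars.lowerChar c = c := by
  unfold PySem.Chars.lower at h
  obtain ⟨d, _, rfl⟩ := List.mem_map.mp h
  exact pvLowerCharIdem d

theorem pvLowerFixedEq {l : List Char} (h : ∀ c ∈ l, PySem.Chars.lowerChar c = c) :
    PySem.Chars.lower l = l := by
  unfold PySem.Chars.lower
  simpa using List.map_congr_left h

theorem pvStripInfix (s : List Char) : PySem.Chars.strip s <:+: s := by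
  unfold PySem.Chars.strip PySem.Chars.rstrip PySem.Chars.lstrip
  have h1 : List.dropWhile PySem.Chars.isspace s <:+ s := List.dropWhile_suffix _
  have h2 : (List.dropWhile PySem.Chars.isspace (List.dropWhile PySem.Chars.isspace s).reverse).reverse
      <+: List.dropWhile PySem.Chars.isspace s := by
    have := (List.dropWhile_suffix (l := (List.dropWhile PySem.Chars.isspace s).reverse) PySem.Chars.isspace).reverse
    simpa using this
  exact h2.isInfix.trans h1.isInfix

theorem pvIsInFalseMono {a u s : List Char} (hus : u <:+: s)
    (h : PySem.Chars.isIn a s = false) : PySem.Chars.isIn a u = false := by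
  rw [PySem.Chars.isIn_eq_false_iff] at h ⊢
  exact fun hin => h (hin.trans hus)

theorem pvSliceGameInfix (s : List Char) : PySem.Chars.slice s none (some (-5)) <:+: s := by
  rw [PySem.Chars.slice_eq_listSlice, show ((-5 : Int)) = (-(5:Nat) : Int) by norm_num]
  unfold PySem.List.slice
  exact (List.take_prefix _ _).isInfix

-- the while-loop body seen from A's side: one unfolding of pvStripGame
theorem pvStripGame_step (s : List Char) (h : PySem.Chars.endswith s "_game".toList = true) :
    pvStripGame s = pvStripGame (PySem.Chars.strip (PySem.Chars.slice s none (some (-5)))) := by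
  rw [pvStripGame, dif_pos h]

theorem pvStripGame_stop (s : List Char) (h : ¬ PySem.Chars.endswith s "_game".toList = true) :
    pvStripGame s = s := by
  rw [pvStripGame, dif_neg h]

theorem pvMain : ∀ (n : ℕ) (x : List Char), x.length ≤ n → pvNormA x = pvNormB x := by
  intro n
  induction n with
  | zero =>
    intro x hx
    have hx0 : x = [] := List.length_eq_zero_iff.mp (Nat.le_zero.mp hx)
    subst hx0
    rw [pvNormA]
    simp [pvNormB, pvAsLower, PySem.Chars.strip, PySem.Chars.lstrip, PySem.Chars.rstrip,
      PySem.Chars.lower]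
  | succ n ih =>
    intro x hx
    rw [pvNormA]
    unfold pvNormB
    set s := pvAsLower x with hs_def
    by_cases hs : s.isEmpty
    · simp [hs]
    · simp only [hs, Bool.false_eq_true, if_false]
      simp only [pvTable, pvScan, List.any_cons, List.any_nil, Bool.or_false]
      split_ifs with h1 h2 h3 h4 h5 h6
      · rfl
      · rfl
      · rfl
      · rfl
      · rfl
      · -- A recurses on t := s[:-5]; B's while loop takes one step to strip t
        show pvNormA (PySem.Chars.slice s none (some (-5))) = pvStripGame s
        set t := PySem.Chars.slice s none (some (-5)) with ht_def
        have htlen : t.length < x.length := by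
          rw [ht_def, hs_def]; exact pvRecLen x h6
        rw [ih t (by omega)]
        set u := PySem.Chars.strip t with hu_def
        have hts : t <:+: s := pvSliceGameInfix s
        have hus : u <:+: s := (pvStripInfix t).trans hts
        have hfix : ∀ c ∈ u, PySem.Chars.lowerChar c = c := by
          intro c hc
          have hcs : c ∈ s := hus.subset hc
          rw [hs_def] at hcs
          exact pvMemLowerFixed hcs
        have hAL : pvAsLower t = u := by
          rw [pvAsLower, ← hu_def]
          exact pvLowerFixedEq hfix
        rw [pvStripGame_step s h6, ← hu_def]
        unfold pvNormB
        rw [hAL]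
        have hscanu : pvScan pvTable u = none := by
          simp only [pvTable, pvScan, List.any_cons, List.any_nil, Bool.or_false]
          rw [if_neg, if_neg, if_neg, if_neg, if_neg]
          all_goals
            simp only [Bool.or_eq_true, not_or, Bool.not_eq_true] at h1 h2 h3 h4 h5 ⊢
          · exact ⟨pvIsInFalseMono hus h5.1, pvIsInFalseMono hus h5.2⟩
          · exact pvIsInFalseMono hus h4
          · exact pvIsInFalseMono hus h3
          · exact pvIsInFalseMono hus h2
          · exact ⟨pvIsInFalseMono hus h1.1, pvIsInFalseMono hus h1.2⟩
        by_cases hu : u.isEmpty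
        · have hu0 : u = [] := by simpa [List.isEmpty_iff] using hu
          rw [hu0, pvStripGame_stop [] (by decide)]
          simp
        · simp only [hu, Bool.false_eq_true, if_false]
          rw [hscanu]
      · exact (pvStripGame_stop s h6).symm

-- ===== VERDICT (by name: the statement is the Claim_ definition above) =====
theorem normalize_time_category_py_spec : Claim_equal_normalize_time_category_py := by
  intro x _
  unfold Spec_normalize_time_category_py normalize_time_category_py normalize_time_category_py_alt
  rw [pvMain x.toList.length x.toList le_rfl]
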